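-- pv_equiv track=rewrite | github.com/Quaeki/Emulator | Emulator_5/Emulator_5.py | _chmod_apply_symbolic
-- ===== SOURCE A (Python) =====
-- def _chmod_apply_symbolic(cur_mode: int, clause: str, is_dir: bool) -> int:
--     i = 0
--     classes = ""
--     while i < len(clause) and clause[i] in "ugoa":
--         classes += clause[i]
--         i += 1
--     if not classes:
--         classes = "a"
--     if i >= len(clause) or clause[i] not in "+-=":
--         raise ValueError(f"неверный синтаксис chmod: '{clause}'")
--     op = clause[i]
--     i += 1
--     if i >= len(clause):
--         raise ValueError(f"неверный синтаксис chmod: '{clause}'")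
--     perms = clause[i:]
--     if not all(c in "rwxX" for c in perms):
--         raise ValueError(f"неверные права в chmod: '{perms}'")
--
--     def bits_for(perms_local: str, cls_char: str) -> int:
--         shift = {"u": 6, "g": 3, "o": 0}[cls_char]
--         mask = 0
--         for ch in perms_local:
--             if ch == "r":
--                 mask |= (0o4 << shift)
--             elif ch == "w":
--                 mask |= (0o2 << shift)
--             elif ch == "x":
--                 mask |= (0o1 << shift)
--             elif ch == "X":
--                 exec_any = (cur_mode & 0o111) != 0
--                 if is_dir or exec_any:
--                     mask |= (0o1 << shift)
--         return mask
--
--     class_mask_all = 0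
--     for cls in classes:
--         class_mask_all |= {
--             "u": 0o700,
--             "g": 0o070,
--             "o": 0o007,
--             "a": 0o777,
--         }[cls]
--
--     new_mode = cur_mode
--
--     if op == "=":
--         set_mask = 0
--         for cls in ("u", "g", "o"):
--             if ("a" in classes) or (cls in classes):
--                 set_mask |= bits_for(perms, cls)
--         new_mode = (new_mode & ~class_mask_all) | (set_mask & class_mask_all)
--     elif op == "+":
--         add_mask = 0
--         for cls in ("u", "g", "o"):
--             if ("a" in classes) or (cls in classes):
--                 add_mask |= bits_for(perms, cls)
--         new_mode |= add_mask
--     elif op == "-":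
--         sub_mask = 0
--         for cls in ("u", "g", "o"):
--             if ("a" in classes) or (cls in classes):
--                 sub_mask |= bits_for(perms, cls)
--         new_mode &= ~sub_mask
--     else:
--         raise ValueError(f"неизвестная операция chmod: '{op}'")
--
--     new_mode &= 0o777
--     return new_mode
-- ===== SOURCE B (Python) =====
-- def _chmod_apply_symbolic(cur_mode: int, clause: str, is_dir: bool) -> int:
--     # Same parse/validation and error messages as the original; then, instead of three
--     # duplicated per-class mask loops, compute one 3-bit nibble from the perms once and
--     # replicate it across the selected classes by multiplying with 0o111.
--     i = 0
--     while i < len(clause) and clause[i] in "ugoa":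
--         i += 1
--     classes = clause[:i] or "a"
--     if i >= len(clause) or clause[i] not in "+-=":
--         raise ValueError(f"неверный синтаксис chmod: '{clause}'")
--     op = clause[i]
--     perms = clause[i + 1:]
--     if not perms:
--         raise ValueError(f"неверный синтаксис chmod: '{clause}'")
--     if not all(c in "rwxX" for c in perms):
--         raise ValueError(f"неверные права в chmod: '{perms}'")
--
--     x_bit = 1 if (is_dir or (cur_mode & 0o111) != 0) else 0
--     nibble = 0
--     for c in perms:
--         nibble |= {"r": 0o4, "w": 0o2, "x": 0o1, "X": x_bit}[c]
--
--     cmask = (0o700 if ("a" in classes or "u" in classes) else 0) \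
--         | (0o070 if ("a" in classes or "g" in classes) else 0) \
--         | (0o007 if ("a" in classes or "o" in classes) else 0)
--     mask = (nibble * 0o111) & cmask
--
--     if op == "=":
--         new_mode = (cur_mode & ~cmask) | mask
--     elif op == "+":
--         new_mode = cur_mode | mask
--     else:
--         new_mode = cur_mode & ~mask
--     return new_mode & 0o777
-- ===== Notes on version B (the rewrite author's own statement) =====
-- stated objective: simpler
-- what changed: Instead of A's three duplicated per-class loops calling bits_for (which rescans the perms string once per class with a shifted constant table), B computes a single 3-bit permission nibble from the perms once, replicates it across all three classes by multiplying with 0o111, and intersects with one class mask built from three conditionals; parsing, validation and error messages are unchanged.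
import Mathlib
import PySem

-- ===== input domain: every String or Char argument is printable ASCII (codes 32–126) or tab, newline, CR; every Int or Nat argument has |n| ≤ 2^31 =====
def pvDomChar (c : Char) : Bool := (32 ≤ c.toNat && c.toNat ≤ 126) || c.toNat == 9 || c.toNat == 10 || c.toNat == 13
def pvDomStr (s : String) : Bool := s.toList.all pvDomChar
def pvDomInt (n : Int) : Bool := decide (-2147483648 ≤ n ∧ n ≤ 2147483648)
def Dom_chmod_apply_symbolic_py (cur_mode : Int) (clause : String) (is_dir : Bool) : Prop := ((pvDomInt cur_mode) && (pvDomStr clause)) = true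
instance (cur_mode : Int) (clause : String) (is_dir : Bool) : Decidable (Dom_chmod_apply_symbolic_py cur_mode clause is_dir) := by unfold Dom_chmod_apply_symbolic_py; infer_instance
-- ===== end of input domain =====

-- B replaces A's three duplicated per-class mask loops by computing one 3-bit permission
-- nibble from the perms once and replicating it across the selected classes with *0o111;
-- objective: simpler (same parse and validation, same result).

-- character-class tests shared by both ports (Python's `c in "ugoa"` etc.)
def chmodIsClass (c : Char) : Bool := c == 'u' || c == 'g' || c == 'o' || c == 'a'
def chmodIsOp (c : Char) : Bool := c == '+' || c == '-' || c == '='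
def chmodIsPerm (c : Char) : Bool := c == 'r' || c == 'w' || c == 'x' || c == 'X'

-- ===== PORT A =====
-- A's while loop: accumulates `classes` one char at a time and leaves the rest of the clause
def pyChmodScan (acc : List Char) : List Char → List Char × List Char
  | [] => (acc, [])
  | c :: rest => if chmodIsClass c then pyChmodScan (acc ++ [c]) rest else (acc, c :: rest)

-- A's bits_for helper: `{u:6,g:3,o:0}[cls]` lookup (cls is always 'u'/'g'/'o'), then the
-- per-char loop; `0o4 << shift` is Int `<<<` (Python-exact per PYSEM.md)
def pyChmodBitsFor (cur_mode : Int) (is_dir : Bool) (perms : List Char) (cls : Char) : Int :=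
  let shift : Nat := if cls == 'u' then 6 else if cls == 'g' then 3 else 0
  perms.foldl (fun mask ch =>
    if ch == 'r' then PySem.Int.bor mask ((4 : Int) <<< shift)
    else if ch == 'w' then PySem.Int.bor mask ((2 : Int) <<< shift)
    else if ch == 'x' then PySem.Int.bor mask ((1 : Int) <<< shift)
    else if ch == 'X' then
      -- exec_any = (cur_mode & 0o111) != 0; if is_dir or exec_any: mask |= 1 << shift
      if is_dir = true ∨ PySem.Int.band cur_mode 73 ≠ 0 then PySem.Int.bor mask ((1 : Int) <<< shift)
      else mask
    else mask) 0

def chmod_apply_symbolic_py (cur_mode : Int) (clause : String) (is_dir : Bool) : Int :=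
  let cs := clause.toList
  let scanned := pyChmodScan [] cs
  let classes := if scanned.1 = [] then ['a'] else scanned.1
  match scanned.2 with
  | [] => 0  -- raise ValueError (no operator): excluded by Pre_
  | opc :: tail =>
    if ¬ chmodIsOp opc then 0       -- raise ValueError: excluded by Pre_
    else if tail = [] then 0        -- raise ValueError: excluded by Pre_
    else if ¬ (∀ c ∈ tail, chmodIsPerm c = true) then 0  -- raise ValueError: excluded by Pre_
    else
      -- class_mask_all loop; the dict KeyError is unreachable (classes chars are in "ugoa")
      let class_mask_all : Int := classes.foldl (fun m c =>
        if c == 'u' then PySem.Int.bor m 448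
        else if c == 'g' then PySem.Int.bor m 56
        else if c == 'o' then PySem.Int.bor m 7
        else if c == 'a' then PySem.Int.bor m 511
        else m) 0
      if opc == '=' then
        let set_mask : Int := (['u', 'g', 'o'] : List Char).foldl (fun m cls =>
          if 'a' ∈ classes ∨ cls ∈ classes then PySem.Int.bor m (pyChmodBitsFor cur_mode is_dir tail cls) else m) 0
        PySem.Int.band (PySem.Int.bor (PySem.Int.band cur_mode (Int.not class_mask_all)) (PySem.Int.band set_mask class_mask_all)) 511
      else if opc == '+' then
        let add_mask : Int := (['u', 'g', 'o'] : List Char).foldl (fun m cls =>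
          if 'a' ∈ classes ∨ cls ∈ classes then PySem.Int.bor m (pyChmodBitsFor cur_mode is_dir tail cls) else m) 0
        PySem.Int.band (PySem.Int.bor cur_mode add_mask) 511
      else
        -- opc is '-' here; Python's final `else: raise` is unreachable
        let sub_mask : Int := (['u', 'g', 'o'] : List Char).foldl (fun m cls =>
          if 'a' ∈ classes ∨ cls ∈ classes then PySem.Int.bor m (pyChmodBitsFor cur_mode is_dir tail cls) else m) 0
        PySem.Int.band (PySem.Int.band cur_mode (Int.not sub_mask)) 511

-- ===== PORT B =====
-- B's while loop: just counts the leading class characters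
def altChmodLead : List Char → Nat
  | [] => 0
  | c :: rest => if chmodIsClass c then altChmodLead rest + 1 else 0

def chmod_apply_symbolic_py_alt (cur_mode : Int) (clause : String) (is_dir : Bool) : Int :=
  let cs := clause.toList
  let i := altChmodLead cs
  let classes := if cs.take i = [] then ['a'] else cs.take i
  match cs.drop i with
  | [] => 0  -- raise ValueError: excluded by Pre_
  | opc :: perms =>
    if ¬ chmodIsOp opc then 0       -- raise ValueError: excluded by Pre_
    else if perms = [] then 0       -- raise ValueError: excluded by Pre_
    else if ¬ (∀ c ∈ perms, chmodIsPerm c = true) then 0  -- raise ValueError: excluded by Pre_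
    else
      let x_bit : Int := if is_dir = true ∨ PySem.Int.band cur_mode 73 ≠ 0 then 1 else 0
      -- nibble |= {"r":4,"w":2,"x":1,"X":x_bit}[c]; KeyError unreachable after the check
      let nibble : Int := perms.foldl (fun n c =>
        if c == 'r' then PySem.Int.bor n 4
        else if c == 'w' then PySem.Int.bor n 2
        else if c == 'x' then PySem.Int.bor n 1
        else if c == 'X' then PySem.Int.bor n x_bit
        else n) 0
      let cmask : Int :=
        PySem.Int.bor (PySem.Int.bor
          (if 'a' ∈ classes ∨ 'u' ∈ classes then (448 : Int) else 0)
          (if 'a' ∈ classes ∨ 'g' ∈ classes then (56 : Int) else 0))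
          (if 'a' ∈ classes ∨ 'o' ∈ classes then (7 : Int) else 0)
      let mask : Int := PySem.Int.band (nibble * 73) cmask
      PySem.Int.band
        (if opc == '=' then PySem.Int.bor (PySem.Int.band cur_mode (Int.not cmask)) mask
         else if opc == '+' then PySem.Int.bor cur_mode mask
         else PySem.Int.band cur_mode (Int.not mask)) 511

-- ===== PRECONDITION & SPEC =====
-- Pre_ = exactly the clauses A parses without raising ValueError: optional leading "ugoa"
-- class chars, then one of "+-=", then a nonempty run of "rwxX".
def Pre_chmod_apply_symbolic_py (cur_mode : Int) (clause : String) (is_dir : Bool) : Prop :=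
  (clause.toList.dropWhile chmodIsClass).head?.any chmodIsOp = true ∧
  (clause.toList.dropWhile chmodIsClass).tail ≠ [] ∧
  (clause.toList.dropWhile chmodIsClass).tail.all chmodIsPerm = true
instance (cur_mode : Int) (clause : String) (is_dir : Bool) : Decidable (Pre_chmod_apply_symbolic_py cur_mode clause is_dir) := by
  unfold Pre_chmod_apply_symbolic_py; infer_instance

def pvWitness_chmod_apply_symbolic_py : Int × String × Bool := (420, "u+x", false)

def Spec_chmod_apply_symbolic_py (cur_mode : Int) (clause : String) (is_dir : Bool) (out : Int) : Prop := out = chmod_apply_symbolic_py_alt cur_mode clause is_dir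
instance (cur_mode : Int) (clause : String) (is_dir : Bool) (out : Int) : Decidable (Spec_chmod_apply_symbolic_py cur_mode clause is_dir out) := by unfold Spec_chmod_apply_symbolic_py; infer_instance

-- ===== CLAIM (what is proved, stated in full; the proofs are below) =====
def Claim_equal_chmod_apply_symbolic_py : Prop := ∀ (cur_mode : Int) (clause : String) (is_dir : Bool), Dom_chmod_apply_symbolic_py cur_mode clause is_dir → Pre_chmod_apply_symbolic_py cur_mode clause is_dir → Spec_chmod_apply_symbolic_py cur_mode clause is_dir (chmod_apply_symbolic_py cur_mode clause is_dir)

-- ===== LEMMAS AND PROOFS =====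

-- Nat-side shapes of the two programs' masks (proof-side only)
def bfN (mr mw mx mX : Prop) [Decidable mr] [Decidable mw] [Decidable mx] [Decidable mX] (xb s : Nat) : Nat :=
  (((if mr then 4 <<< s else 0) ||| (if mw then 2 <<< s else 0)) ||| (if mx then 1 <<< s else 0)) ||| (if mX then xb <<< s else 0)

def nibN (mr mw mx mX : Prop) [Decidable mr] [Decidable mw] [Decidable mx] [Decidable mX] (xb : Nat) : Nat :=
  (((if mr then 4 else 0) ||| (if mw then 2 else 0)) ||| (if mx then 1 else 0)) ||| (if mX then xb else 0)

def cmN (mu mg mo ma : Prop) [Decidable mu] [Decidable mg] [Decidable mo] [Decidable ma] : Nat :=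
  (((if mu then 448 else 0) ||| (if mg then 56 else 0)) ||| (if mo then 7 else 0)) ||| (if ma then 511 else 0)

def cmSelN (su sg so : Prop) [Decidable su] [Decidable sg] [Decidable so] : Nat :=
  ((if su then 448 else 0) ||| (if sg then 56 else 0)) ||| (if so then 7 else 0)

-- |||-shape lemmas used by the fold characterisations (proved by bit-blasting)
theorem lorSlot1m (a v x y z : Nat) : (a ||| v) ||| (((v ||| x) ||| y) ||| z) = a ||| (((v ||| x) ||| y) ||| z) := by
  apply Nat.eq_of_testBit_eq; intro i; simp only [Nat.testBit_or]
  cases a.testBit i <;> cases v.testBit i <;> cases x.testBit i <;> cases y.testBit i <;> cases z.testBit i <;> rfl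
theorem lorSlot1z (a v x y z : Nat) : (a ||| v) ||| (((0 ||| x) ||| y) ||| z) = a ||| (((v ||| x) ||| y) ||| z) := by
  apply Nat.eq_of_testBit_eq; intro i; simp only [Nat.testBit_or, Nat.zero_testBit]
  cases a.testBit i <;> cases v.testBit i <;> cases x.testBit i <;> cases y.testBit i <;> cases z.testBit i <;> rfl
theorem lorSlot2m (a v x y z : Nat) : (a ||| v) ||| (((x ||| v) ||| y) ||| z) = a ||| (((x ||| v) ||| y) ||| z) := by
  apply Nat.eq_of_testBit_eq; intro i; simp only [Nat.testBit_or]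
  cases a.testBit i <;> cases v.testBit i <;> cases x.testBit i <;> cases y.testBit i <;> cases z.testBit i <;> rfl
theorem lorSlot2z (a v x y z : Nat) : (a ||| v) ||| (((x ||| 0) ||| y) ||| z) = a ||| (((x ||| v) ||| y) ||| z) := by
  apply Nat.eq_of_testBit_eq; intro i; simp only [Nat.testBit_or, Nat.zero_testBit]
  cases a.testBit i <;> cases v.testBit i <;> cases x.testBit i <;> cases y.testBit i <;> cases z.testBit i <;> rfl
theorem lorSlot3m (a v x y z : Nat) : (a ||| v) ||| (((x ||| y) ||| v) ||| z) = a ||| (((x ||| y) ||| v) ||| z) := by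
  apply Nat.eq_of_testBit_eq; intro i; simp only [Nat.testBit_or]
  cases a.testBit i <;> cases v.testBit i <;> cases x.testBit i <;> cases y.testBit i <;> cases z.testBit i <;> rfl
theorem lorSlot3z (a v x y z : Nat) : (a ||| v) ||| (((x ||| y) ||| 0) ||| z) = a ||| (((x ||| y) ||| v) ||| z) := by
  apply Nat.eq_of_testBit_eq; intro i; simp only [Nat.testBit_or, Nat.zero_testBit]
  cases a.testBit i <;> cases v.testBit i <;> cases x.testBit i <;> cases y.testBit i <;> cases z.testBit i <;> rfl
theorem lorSlot4m (a v x y z : Nat) : (a ||| v) ||| (((x ||| y) ||| z) ||| v) = a ||| (((x ||| y) ||| z) ||| v) := by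
  apply Nat.eq_of_testBit_eq; intro i; simp only [Nat.testBit_or]
  cases a.testBit i <;> cases v.testBit i <;> cases x.testBit i <;> cases y.testBit i <;> cases z.testBit i <;> rfl
theorem lorSlot4z (a v x y z : Nat) : (a ||| v) ||| (((x ||| y) ||| z) ||| 0) = a ||| (((x ||| y) ||| z) ||| v) := by
  apply Nat.eq_of_testBit_eq; intro i; simp only [Nat.testBit_or, Nat.zero_testBit]
  cases a.testBit i <;> cases v.testBit i <;> cases x.testBit i <;> cases y.testBit i <;> cases z.testBit i <;> rfl

-- A's scanning loop = takeWhile/dropWhile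
theorem pyChmodScan_eq (l acc : List Char) :
    pyChmodScan acc l = (acc ++ l.takeWhile chmodIsClass, l.dropWhile chmodIsClass) := by
  induction l generalizing acc with
  | nil => simp [pyChmodScan]
  | cons c rest ih =>
    cases h : chmodIsClass c <;> simp [pyChmodScan, h, ih, List.takeWhile, List.dropWhile]

-- B's counting loop: take/drop of it = takeWhile/dropWhile
theorem altChmodLead_take (l : List Char) : l.take (altChmodLead l) = l.takeWhile chmodIsClass := by
  induction l with
  | nil => rfl
  | cons c rest ih => cases h : chmodIsClass c <;> simp [altChmodLead, h, ih, List.takeWhile]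

theorem altChmodLead_drop (l : List Char) : l.drop (altChmodLead l) = l.dropWhile chmodIsClass := by
  induction l with
  | nil => rfl
  | cons c rest ih => cases h : chmodIsClass c <;> simp [altChmodLead, h, ih, List.dropWhile]

-- characterisation of A's bits_for / B's nibble / A's class-mask folds by membership
theorem charA (q : Prop) [Decidable q] (s : Nat) :
    ∀ (l : List Char) (a : Nat), (∀ c ∈ l, chmodIsPerm c = true) →
    l.foldl (fun mask ch =>
      if ch == 'r' then PySem.Int.bor mask ((4 : Int) <<< s)
      else if ch == 'w' then PySem.Int.bor mask ((2 : Int) <<< s)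
      else if ch == 'x' then PySem.Int.bor mask ((1 : Int) <<< s)
      else if ch == 'X' then
        if q then PySem.Int.bor mask ((1 : Int) <<< s) else mask
      else mask) (a : Nat)
    = ((a ||| bfN ('r' ∈ l) ('w' ∈ l) ('x' ∈ l) ('X' ∈ l) (if q then 1 else 0) s : Nat) : Int) := by
  intro l
  induction l with
  | nil => intro a _; simp [bfN]
  | cons c rest ih =>
    intro a h
    have hc : ((c = 'r' ∨ c = 'w') ∨ c = 'x') ∨ c = 'X' := by
      have := h c List.mem_cons_self; simpa [chmodIsPerm] using this
    have hrest : ∀ c ∈ rest, chmodIsPerm c = true := fun c hc => h c (List.mem_cons_of_mem _ hc)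
    have c4 : ((4 : Int) <<< s) = ((4 <<< s : Nat) : Int) := by push_cast; rfl
    rcases hc with ((rfl | rfl) | rfl) | rfl
    · rw [List.foldl_cons]
      simp only [show (('r':Char) == 'r') = true from rfl, if_true]
      have hacc : PySem.Int.bor (a : Nat) ((4 : Int) <<< s) = ((a ||| 4 <<< s : Nat) : Int) := by
        rw [c4, PySem.Int.bor_natCast]
      rw [hacc, ih _ hrest]
      norm_cast
      simp only [bfN, List.mem_cons]
      norm_num
      by_cases hm : ('r':Char) ∈ rest
      · simp only [hm, if_true]
        simp only [show (('w':Char) = 'r') = False from by simp, show (('x':Char) = 'r') = False from by simp,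
          show (('X':Char) = 'r') = False from by simp, false_or, if_true]
        exact lorSlot1m ..
      · simp only [hm, if_false]
        simp only [show (('w':Char) = 'r') = False from by simp, show (('x':Char) = 'r') = False from by simp,
          show (('X':Char) = 'r') = False from by simp, false_or]
        exact lorSlot1z ..
    · -- 'w'
      rw [List.foldl_cons]
      simp only [show (('w':Char) == 'r') = false from rfl, show (('w':Char) == 'w') = true from rfl,
        Bool.false_eq_true, if_false, if_true]
      have c2 : ((2 : Int) <<< s) = ((2 <<< s : Nat) : Int) := by push_cast; rfl
      have hacc : PySem.Int.bor (a : Nat) ((2 : Int) <<< s) = ((a ||| 2 <<< s : Nat) : Int) := by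
        rw [c2, PySem.Int.bor_natCast]
      rw [hacc, ih _ hrest]
      norm_cast
      simp only [bfN, List.mem_cons]
      norm_num
      by_cases hm : ('w':Char) ∈ rest
      · simp only [hm, if_true]
        simp only [show (('r':Char) = 'w') = False from by simp, show (('x':Char) = 'w') = False from by simp,
          show (('X':Char) = 'w') = False from by simp, false_or, if_true]
        exact lorSlot2m ..
      · simp only [hm, if_false]
        simp only [show (('r':Char) = 'w') = False from by simp, show (('x':Char) = 'w') = False from by simp,
          show (('X':Char) = 'w') = False from by simp, false_or]
        exact lorSlot2z ..
    · -- 'x'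
      rw [List.foldl_cons]
      simp only [show (('x':Char) == 'r') = false from rfl, show (('x':Char) == 'w') = false from rfl,
        show (('x':Char) == 'x') = true from rfl, Bool.false_eq_true, if_false, if_true]
      have c1 : ((1 : Int) <<< s) = ((1 <<< s : Nat) : Int) := by push_cast; rfl
      have hacc : PySem.Int.bor (a : Nat) ((1 : Int) <<< s) = ((a ||| 1 <<< s : Nat) : Int) := by
        rw [c1, PySem.Int.bor_natCast]
      rw [hacc, ih _ hrest]
      norm_cast
      simp only [bfN, List.mem_cons]
      norm_num
      by_cases hm : ('x':Char) ∈ rest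
      · simp only [hm, if_true]
        simp only [show (('r':Char) = 'x') = False from by simp, show (('w':Char) = 'x') = False from by simp,
          show (('X':Char) = 'x') = False from by simp, false_or, if_true]
        exact lorSlot3m ..
      · simp only [hm, if_false]
        simp only [show (('r':Char) = 'x') = False from by simp, show (('w':Char) = 'x') = False from by simp,
          show (('X':Char) = 'x') = False from by simp, false_or]
        exact lorSlot3z ..
    · -- 'X'
      rw [List.foldl_cons]
      simp only [show (('X':Char) == 'r') = false from rfl, show (('X':Char) == 'w') = false from rfl,
        show (('X':Char) == 'x') = false from rfl, show (('X':Char) == 'X') = true from rfl,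
        Bool.false_eq_true, if_false, if_true]
      by_cases hq : q
      · have c1 : ((1 : Int) <<< s) = ((1 <<< s : Nat) : Int) := by push_cast; rfl
        have hacc : (if q then PySem.Int.bor (a : Nat) ((1 : Int) <<< s) else ((a : Nat) : Int)) = ((a ||| 1 <<< s : Nat) : Int) := by
          rw [if_pos hq, c1, PySem.Int.bor_natCast]
        rw [hacc, ih _ hrest]
        norm_cast
        simp only [bfN, List.mem_cons, if_pos hq]
        norm_num
        by_cases hm : ('X':Char) ∈ rest
        · simp only [hm, if_true]
          simp only [show (('r':Char) = 'X') = False from by simp, show (('w':Char) = 'X') = False from by simp,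
            show (('x':Char) = 'X') = False from by simp, false_or, if_true]
          exact lorSlot4m ..
        · simp only [hm, if_false]
          simp only [show (('r':Char) = 'X') = False from by simp, show (('w':Char) = 'X') = False from by simp,
            show (('x':Char) = 'X') = False from by simp, false_or]
          exact lorSlot4z ..
      · have hacc : (if q then PySem.Int.bor (a : Nat) ((1 : Int) <<< s) else ((a : Nat) : Int)) = ((a : Nat) : Int) := if_neg hq
        rw [hacc, ih _ hrest]
        norm_cast
        simp only [bfN, List.mem_cons, if_neg hq]
        simp [Nat.zero_shiftLeft, show (('r':Char) = 'X') = False from by simp,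
          show (('w':Char) = 'X') = False from by simp, show (('x':Char) = 'X') = False from by simp]

theorem charB (xb : Int) (xbn : Nat) (hxb : xb = (xbn : Int)) :
    ∀ (l : List Char) (a : Nat), (∀ c ∈ l, chmodIsPerm c = true) →
    l.foldl (fun n c =>
      if c == 'r' then PySem.Int.bor n 4
      else if c == 'w' then PySem.Int.bor n 2
      else if c == 'x' then PySem.Int.bor n 1
      else if c == 'X' then PySem.Int.bor n xb
      else n) (a : Nat)
    = ((a ||| nibN ('r' ∈ l) ('w' ∈ l) ('x' ∈ l) ('X' ∈ l) xbn : Nat) : Int) := by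
  intro l
  induction l with
  | nil => intro a _; simp [nibN]
  | cons c rest ih =>
    intro a h
    have hc : ((c = 'r' ∨ c = 'w') ∨ c = 'x') ∨ c = 'X' := by
      have := h c List.mem_cons_self; simpa [chmodIsPerm] using this
    have hrest : ∀ c ∈ rest, chmodIsPerm c = true := fun c hc => h c (List.mem_cons_of_mem _ hc)
    rcases hc with ((rfl | rfl) | rfl) | rfl
    · -- 'r'
      rw [List.foldl_cons]
      simp only [show (('r':Char) == 'r') = true from rfl, Bool.false_eq_true, if_false, if_true]
      have hacc : PySem.Int.bor (a : Nat) (4 : Int) = ((a ||| 4 : Nat) : Int) := by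
        rw [show ((4 : Int)) = ((4 : Nat) : Int) from by norm_cast, PySem.Int.bor_natCast]
      rw [hacc, ih _ hrest]
      norm_cast
      simp only [nibN, List.mem_cons]
      norm_num
      by_cases hm : ('r':Char) ∈ rest
      · simp only [hm, if_true]
        simp only [show (('w':Char) = 'r') = False from by simp,
          show (('x':Char) = 'r') = False from by simp,
          show (('X':Char) = 'r') = False from by simp, false_or, if_true]
        exact lorSlot1m ..
      · simp only [hm, if_false]
        simp only [show (('w':Char) = 'r') = False from by simp,
          show (('x':Char) = 'r') = False from by simp,
          show (('X':Char) = 'r') = False from by simp, false_or]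
        exact lorSlot1z ..
    · -- 'w'
      rw [List.foldl_cons]
      simp only [show (('w':Char) == 'r') = false from rfl, show (('w':Char) == 'w') = true from rfl, Bool.false_eq_true, if_false, if_true]
      have hacc : PySem.Int.bor (a : Nat) (2 : Int) = ((a ||| 2 : Nat) : Int) := by
        rw [show ((2 : Int)) = ((2 : Nat) : Int) from by norm_cast, PySem.Int.bor_natCast]
      rw [hacc, ih _ hrest]
      norm_cast
      simp only [nibN, List.mem_cons]
      norm_num
      by_cases hm : ('w':Char) ∈ rest
      · simp only [hm, if_true]
        simp only [show (('r':Char) = 'w') = False from by simp,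
          show (('x':Char) = 'w') = False from by simp,
          show (('X':Char) = 'w') = False from by simp, false_or, if_true]
        exact lorSlot2m ..
      · simp only [hm, if_false]
        simp only [show (('r':Char) = 'w') = False from by simp,
          show (('x':Char) = 'w') = False from by simp,
          show (('X':Char) = 'w') = False from by simp, false_or]
        exact lorSlot2z ..
    · -- 'x'
      rw [List.foldl_cons]
      simp only [show (('x':Char) == 'r') = false from rfl, show (('x':Char) == 'w') = false from rfl, show (('x':Char) == 'x') = true from rfl, Bool.false_eq_true, if_false, if_true]
      have hacc : PySem.Int.bor (a : Nat) (1 : Int) = ((a ||| 1 : Nat) : Int) := by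
        rw [show ((1 : Int)) = ((1 : Nat) : Int) from by norm_cast, PySem.Int.bor_natCast]
      rw [hacc, ih _ hrest]
      norm_cast
      simp only [nibN, List.mem_cons]
      norm_num
      by_cases hm : ('x':Char) ∈ rest
      · simp only [hm, if_true]
        simp only [show (('r':Char) = 'x') = False from by simp,
          show (('w':Char) = 'x') = False from by simp,
          show (('X':Char) = 'x') = False from by simp, false_or, if_true]
        exact lorSlot3m ..
      · simp only [hm, if_false]
        simp only [show (('r':Char) = 'x') = False from by simp,
          show (('w':Char) = 'x') = False from by simp,
          show (('X':Char) = 'x') = False from by simp, false_or]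
        exact lorSlot3z ..
    · -- 'X'
      rw [List.foldl_cons]
      simp only [show (('X':Char) == 'r') = false from rfl, show (('X':Char) == 'w') = false from rfl,
        show (('X':Char) == 'x') = false from rfl, show (('X':Char) == 'X') = true from rfl,
        Bool.false_eq_true, if_false, if_true]
      have hacc : PySem.Int.bor (a : Nat) xb = ((a ||| xbn : Nat) : Int) := by
        rw [hxb, PySem.Int.bor_natCast]
      rw [hacc, ih _ hrest]
      norm_cast
      simp only [nibN, List.mem_cons]
      norm_num
      by_cases hm : ('X':Char) ∈ rest
      · simp only [hm, if_true]
        simp only [show (('r':Char) = 'X') = False from by simp, show (('w':Char) = 'X') = False from by simp,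
          show (('x':Char) = 'X') = False from by simp, false_or, if_true]
        exact lorSlot4m ..
      · simp only [hm, if_false]
        simp only [show (('r':Char) = 'X') = False from by simp, show (('w':Char) = 'X') = False from by simp,
          show (('x':Char) = 'X') = False from by simp, false_or]
        exact lorSlot4z ..

theorem charCM :
    ∀ (l : List Char) (a : Nat), (∀ c ∈ l, chmodIsClass c = true) →
    l.foldl (fun m c =>
      if c == 'u' then PySem.Int.bor m 448
      else if c == 'g' then PySem.Int.bor m 56
      else if c == 'o' then PySem.Int.bor m 7
      else if c == 'a' then PySem.Int.bor m 511
      else m) (a : Nat)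
    = ((a ||| cmN ('u' ∈ l) ('g' ∈ l) ('o' ∈ l) ('a' ∈ l) : Nat) : Int) := by
  intro l
  induction l with
  | nil => intro a _; simp [cmN]
  | cons c rest ih =>
    intro a h
    have hc : ((c = 'u' ∨ c = 'g') ∨ c = 'o') ∨ c = 'a' := by
      have := h c List.mem_cons_self; simpa [chmodIsClass] using this
    have hrest : ∀ c ∈ rest, chmodIsClass c = true := fun c hc => h c (List.mem_cons_of_mem _ hc)
    rcases hc with ((rfl | rfl) | rfl) | rfl
    · -- 'u'
      rw [List.foldl_cons]
      simp only [show (('u':Char) == 'u') = true from rfl, Bool.false_eq_true, if_false, if_true]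
      have hacc : PySem.Int.bor (a : Nat) (448 : Int) = ((a ||| 448 : Nat) : Int) := by
        rw [show ((448 : Int)) = ((448 : Nat) : Int) from by norm_cast, PySem.Int.bor_natCast]
      rw [hacc, ih _ hrest]
      norm_cast
      simp only [cmN, List.mem_cons]
      norm_num
      by_cases hm : ('u':Char) ∈ rest
      · simp only [hm, if_true]
        simp only [show (('g':Char) = 'u') = False from by simp,
          show (('o':Char) = 'u') = False from by simp,
          show (('a':Char) = 'u') = False from by simp, false_or, if_true]
        exact lorSlot1m ..
      · simp only [hm, if_false]
        simp only [show (('g':Char) = 'u') = False from by simp,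
          show (('o':Char) = 'u') = False from by simp,
          show (('a':Char) = 'u') = False from by simp, false_or]
        exact lorSlot1z ..
    · -- 'g'
      rw [List.foldl_cons]
      simp only [show (('g':Char) == 'u') = false from rfl, show (('g':Char) == 'g') = true from rfl, Bool.false_eq_true, if_false, if_true]
      have hacc : PySem.Int.bor (a : Nat) (56 : Int) = ((a ||| 56 : Nat) : Int) := by
        rw [show ((56 : Int)) = ((56 : Nat) : Int) from by norm_cast, PySem.Int.bor_natCast]
      rw [hacc, ih _ hrest]
      norm_cast
      simp only [cmN, List.mem_cons]
      norm_num
      by_cases hm : ('g':Char) ∈ rest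
      · simp only [hm, if_true]
        simp only [show (('u':Char) = 'g') = False from by simp,
          show (('o':Char) = 'g') = False from by simp,
          show (('a':Char) = 'g') = False from by simp, false_or, if_true]
        exact lorSlot2m ..
      · simp only [hm, if_false]
        simp only [show (('u':Char) = 'g') = False from by simp,
          show (('o':Char) = 'g') = False from by simp,
          show (('a':Char) = 'g') = False from by simp, false_or]
        exact lorSlot2z ..
    · -- 'o'
      rw [List.foldl_cons]
      simp only [show (('o':Char) == 'u') = false from rfl, show (('o':Char) == 'g') = false from rfl, show (('o':Char) == 'o') = true from rfl, Bool.false_eq_true, if_false, if_true]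
      have hacc : PySem.Int.bor (a : Nat) (7 : Int) = ((a ||| 7 : Nat) : Int) := by
        rw [show ((7 : Int)) = ((7 : Nat) : Int) from by norm_cast, PySem.Int.bor_natCast]
      rw [hacc, ih _ hrest]
      norm_cast
      simp only [cmN, List.mem_cons]
      norm_num
      by_cases hm : ('o':Char) ∈ rest
      · simp only [hm, if_true]
        simp only [show (('u':Char) = 'o') = False from by simp,
          show (('g':Char) = 'o') = False from by simp,
          show (('a':Char) = 'o') = False from by simp, false_or, if_true]
        exact lorSlot3m ..
      · simp only [hm, if_false]
        simp only [show (('u':Char) = 'o') = False from by simp,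
          show (('g':Char) = 'o') = False from by simp,
          show (('a':Char) = 'o') = False from by simp, false_or]
        exact lorSlot3z ..
    · -- 'a'
      rw [List.foldl_cons]
      simp only [show (('a':Char) == 'u') = false from rfl, show (('a':Char) == 'g') = false from rfl, show (('a':Char) == 'o') = false from rfl, show (('a':Char) == 'a') = true from rfl, Bool.false_eq_true, if_false, if_true]
      have hacc : PySem.Int.bor (a : Nat) (511 : Int) = ((a ||| 511 : Nat) : Int) := by
        rw [show ((511 : Int)) = ((511 : Nat) : Int) from by norm_cast, PySem.Int.bor_natCast]
      rw [hacc, ih _ hrest]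
      norm_cast
      simp only [cmN, List.mem_cons]
      norm_num
      by_cases hm : ('a':Char) ∈ rest
      · simp only [hm, if_true]
        simp only [show (('u':Char) = 'a') = False from by simp,
          show (('g':Char) = 'a') = False from by simp,
          show (('o':Char) = 'a') = False from by simp, false_or, if_true]
        exact lorSlot4m ..
      · simp only [hm, if_false]
        simp only [show (('u':Char) = 'a') = False from by simp,
          show (('g':Char) = 'a') = False from by simp,
          show (('o':Char) = 'a') = False from by simp, false_or]
        exact lorSlot4z ..

-- the two Nat-level mask identities connecting A's masks with B's
theorem natCM (mu mg mo ma : Prop) [Decidable mu] [Decidable mg] [Decidable mo] [Decidable ma] :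
    cmN mu mg mo ma = cmSelN (ma ∨ mu) (ma ∨ mg) (ma ∨ mo) := by
  unfold cmN cmSelN; split_ifs <;> first | rfl | tauto | decide

theorem natSM (su sg so mr mw mx mX : Prop) [Decidable su] [Decidable sg] [Decidable so]
    [Decidable mr] [Decidable mw] [Decidable mx] [Decidable mX] (xb : Nat) (hxb : xb = 0 ∨ xb = 1) :
    (if so then (if sg then (if su then 0 ||| bfN mr mw mx mX xb 6 else 0) ||| bfN mr mw mx mX xb 3
                 else (if su then 0 ||| bfN mr mw mx mX xb 6 else 0)) ||| bfN mr mw mx mX xb 0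
     else (if sg then (if su then 0 ||| bfN mr mw mx mX xb 6 else 0) ||| bfN mr mw mx mX xb 3
           else (if su then 0 ||| bfN mr mw mx mX xb 6 else 0)))
    = (nibN mr mw mx mX xb * 73) &&& cmSelN su sg so := by
  rcases hxb with rfl | rfl <;> (unfold bfN nibN cmSelN; split_ifs <;> decide)

theorem landDup (x c : Nat) : (x &&& c) &&& c = x &&& c := by
  apply Nat.eq_of_testBit_eq; intro i; simp only [Nat.testBit_and]
  cases x.testBit i <;> cases c.testBit i <;> rfl

-- the same characterisations at the ports' initial accumulator 0
theorem charA0 (q : Prop) [Decidable q] (s : Nat) (l : List Char) (h : ∀ c ∈ l, chmodIsPerm c = true) :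
    l.foldl (fun mask ch =>
      if ch == 'r' then PySem.Int.bor mask ((4 : Int) <<< s)
      else if ch == 'w' then PySem.Int.bor mask ((2 : Int) <<< s)
      else if ch == 'x' then PySem.Int.bor mask ((1 : Int) <<< s)
      else if ch == 'X' then
        if q then PySem.Int.bor mask ((1 : Int) <<< s) else mask
      else mask) (0 : Int)
    = ((bfN ('r' ∈ l) ('w' ∈ l) ('x' ∈ l) ('X' ∈ l) (if q then 1 else 0) s : Nat) : Int) := by
  have := charA q s l 0 h
  rw [show (((0 : Nat) : Int)) = (0 : Int) from rfl, Nat.zero_or] at this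
  exact this

theorem charB0 (xb : Int) (xbn : Nat) (hxb : xb = (xbn : Int)) (l : List Char)
    (h : ∀ c ∈ l, chmodIsPerm c = true) :
    l.foldl (fun n c =>
      if c == 'r' then PySem.Int.bor n 4
      else if c == 'w' then PySem.Int.bor n 2
      else if c == 'x' then PySem.Int.bor n 1
      else if c == 'X' then PySem.Int.bor n xb
      else n) (0 : Int)
    = ((nibN ('r' ∈ l) ('w' ∈ l) ('x' ∈ l) ('X' ∈ l) xbn : Nat) : Int) := by
  have := charB xb xbn hxb l 0 h
  rw [show (((0 : Nat) : Int)) = (0 : Int) from rfl, Nat.zero_or] at this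
  exact this

theorem charCM0 (l : List Char) (h : ∀ c ∈ l, chmodIsClass c = true) :
    l.foldl (fun m c =>
      if c == 'u' then PySem.Int.bor m 448
      else if c == 'g' then PySem.Int.bor m 56
      else if c == 'o' then PySem.Int.bor m 7
      else if c == 'a' then PySem.Int.bor m 511
      else m) (0 : Int)
    = ((cmN ('u' ∈ l) ('g' ∈ l) ('o' ∈ l) ('a' ∈ l) : Nat) : Int) := by
  have := charCM l 0 h
  rw [show (((0 : Nat) : Int)) = (0 : Int) from rfl, Nat.zero_or] at this
  exact this

-- casting helpers for the selection folds and B's literal if-terms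
theorem selStep0 (p : Prop) [Decidable p] (b : Nat) :
    (if p then PySem.Int.bor (0 : Int) (b : Nat) else (0 : Int)) = (((if p then 0 ||| b else 0 : Nat)) : Int) := by
  split_ifs with h
  · rw [show ((0 : Int)) = (((0 : Nat)) : Int) from rfl, PySem.Int.bor_natCast]
  · rfl

theorem selStep (p : Prop) [Decidable p] (m b : Nat) :
    (if p then PySem.Int.bor (m : Nat) (b : Nat) else ((m : Nat) : Int)) = (((if p then m ||| b else m : Nat)) : Int) := by
  split_ifs with h <;> simp

theorem iteCastC (p : Prop) [Decidable p] (w : Int) (v : Nat) (hwv : w = (v : Int)) :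
    (if p then w else 0) = (((if p then v else 0 : Nat)) : Int) := by
  split_ifs with h <;> simp [hwv]

-- ===== VERDICT (by name: the statement is the Claim_ definition above) =====
theorem chmod_apply_symbolic_py_spec : Claim_equal_chmod_apply_symbolic_py := by
  intro cur clause d _ hpre
  obtain ⟨hop, htail, hperm'⟩ := hpre
  have hperm : ∀ c ∈ (clause.toList.dropWhile chmodIsClass).tail, chmodIsPerm c = true := by
    simpa [List.all_eq_true] using hperm'
  clear hperm'
  unfold Spec_chmod_apply_symbolic_py
  obtain ⟨opc, tail, hrest⟩ : ∃ opc tail, clause.toList.dropWhile chmodIsClass = opc :: tail := by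
    cases h : clause.toList.dropWhile chmodIsClass with
    | nil => rw [h] at hop; simp at hop
    | cons a b => exact ⟨a, b, rfl⟩
  rw [hrest] at hop htail hperm
  simp only [List.head?_cons, Option.any_some] at hop
  simp only [List.tail_cons] at htail hperm
  unfold chmod_apply_symbolic_py chmod_apply_symbolic_py_alt
  simp only [pyChmodScan_eq, altChmodLead_take, altChmodLead_drop, List.nil_append, hrest]
  have hclasses : ∀ c ∈ (if clause.toList.takeWhile chmodIsClass = [] then ['a'] else clause.toList.takeWhile chmodIsClass), chmodIsClass c = true := by
    split_ifs with h
    · intro c hc; simp only [List.mem_singleton] at hc; subst hc; rfl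
    · intro c hc; exact List.mem_takeWhile_imp hc
  set CLS := (if clause.toList.takeWhile chmodIsClass = [] then ['a'] else clause.toList.takeWhile chmodIsClass) with hCLS
  clear_value CLS
  rw [hop]
  simp only [not_true, if_false]
  rw [if_neg htail, if_neg htail, if_neg (not_not_intro hperm), if_neg (not_not_intro hperm)]
  rw [charCM0 CLS hclasses]
  have hbfu : pyChmodBitsFor cur d tail 'u' = ((bfN ('r' ∈ tail) ('w' ∈ tail) ('x' ∈ tail) ('X' ∈ tail) (if (d = true ∨ PySem.Int.band cur 73 ≠ 0) then 1 else 0) 6 : Nat) : Int) := by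
    unfold pyChmodBitsFor
    simp only [show (('u':Char) == 'u') = true from rfl, if_true]
    exact charA0 _ 6 tail hperm
  have hbfg : pyChmodBitsFor cur d tail 'g' = ((bfN ('r' ∈ tail) ('w' ∈ tail) ('x' ∈ tail) ('X' ∈ tail) (if (d = true ∨ PySem.Int.band cur 73 ≠ 0) then 1 else 0) 3 : Nat) : Int) := by
    unfold pyChmodBitsFor
    simp only [show (('g':Char) == 'u') = false from rfl, show (('g':Char) == 'g') = true from rfl,
      Bool.false_eq_true, if_false, if_true]
    exact charA0 _ 3 tail hperm
  have hbfo : pyChmodBitsFor cur d tail 'o' = ((bfN ('r' ∈ tail) ('w' ∈ tail) ('x' ∈ tail) ('X' ∈ tail) (if (d = true ∨ PySem.Int.band cur 73 ≠ 0) then 1 else 0) 0 : Nat) : Int) := by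
    unfold pyChmodBitsFor
    simp only [show (('o':Char) == 'u') = false from rfl, show (('o':Char) == 'g') = false from rfl,
      Bool.false_eq_true, if_false]
    exact charA0 _ 0 tail hperm
  simp only [List.foldl_cons, List.foldl_nil]
  rw [hbfu, hbfg, hbfo]
  rw [selStep0, selStep, selStep]
  rw [charB0 (if (d = true ∨ PySem.Int.band cur 73 ≠ 0) then (1:Int) else 0) (if (d = true ∨ PySem.Int.band cur 73 ≠ 0) then 1 else 0) (by split_ifs <;> simp) tail hperm]
  rw [iteCastC ('a' ∈ CLS ∨ 'u' ∈ CLS) 448 448 (by norm_cast),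
    iteCastC ('a' ∈ CLS ∨ 'g' ∈ CLS) 56 56 (by norm_cast),
    iteCastC ('a' ∈ CLS ∨ 'o' ∈ CLS) 7 7 (by norm_cast)]
  rw [PySem.Int.bor_natCast, PySem.Int.bor_natCast]
  rw [show (((nibN ('r' ∈ tail) ('w' ∈ tail) ('x' ∈ tail) ('X' ∈ tail) (if (d = true ∨ PySem.Int.band cur 73 ≠ 0) then 1 else 0) : Nat) : Int) * 73) = ((nibN ('r' ∈ tail) ('w' ∈ tail) ('x' ∈ tail) ('X' ∈ tail) (if (d = true ∨ PySem.Int.band cur 73 ≠ 0) then 1 else 0) * 73 : Nat) : Int) from by push_cast; ring]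
  rw [PySem.Int.band_natCast]
  rw [show ((((if 'a' ∈ CLS ∨ 'u' ∈ CLS then 448 else 0) ||| (if 'a' ∈ CLS ∨ 'g' ∈ CLS then 56 else 0)) ||| (if 'a' ∈ CLS ∨ 'o' ∈ CLS then 7 else 0) : Nat)) = cmSelN ('a' ∈ CLS ∨ 'u' ∈ CLS) ('a' ∈ CLS ∨ 'g' ∈ CLS) ('a' ∈ CLS ∨ 'o' ∈ CLS) from rfl]
  rw [natCM ('u' ∈ CLS) ('g' ∈ CLS) ('o' ∈ CLS) ('a' ∈ CLS)]
  rw [natSM ('a' ∈ CLS ∨ 'u' ∈ CLS) ('a' ∈ CLS ∨ 'g' ∈ CLS) ('a' ∈ CLS ∨ 'o' ∈ CLS)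
    ('r' ∈ tail) ('w' ∈ tail) ('x' ∈ tail) ('X' ∈ tail) (if (d = true ∨ PySem.Int.band cur 73 ≠ 0) then 1 else 0) (by split_ifs <;> simp)]
  rw [PySem.Int.band_natCast, landDup]
  have hop3 : ((opc = '+' ∨ opc = '-') ∨ opc = '=') := by simpa [chmodIsOp] using hop
  rcases hop3 with ((rfl | rfl) | rfl)
  · simp only [show (('+':Char) == '=') = false from rfl, show (('+':Char) == '+') = true from rfl,
      Bool.false_eq_true, if_false, if_true]
  · simp only [show (('-':Char) == '=') = false from rfl, show (('-':Char) == '+') = false from rfl,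
      Bool.false_eq_true, if_false]
  · simp only [show (('=':Char) == '=') = true from rfl, if_true]
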